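-- pv_equiv track=rewrite | github.com/tuxpeople/mac-dev-playbook | scripts/remove-orphaned-comments.py | is_other_command
-- ===== SOURCE A (Python) =====
-- def is_other_command(line):
--     """Check if line contains other commands we want to keep"""
--     stripped = line.strip()
--     if not stripped or stripped.startswith('#'):
--         return False
--
--     # Commands to keep
--     keep_patterns = [
--         'sudo', 'osascript', 'killall', 'launchctl',
--         '/usr/libexec/PlistBuddy', 'chflags', 'xattr',
--         'find', 'for app in', 'if [', 'fi', 'done',
--         'printf', 'defaults -currentHost'
--     ]
--
--     return any(pattern in line for pattern in keep_patterns)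
-- ===== SOURCE B (Python) =====
-- KEEP_PATTERNS = [
--     'sudo', 'osascript', 'killall', 'launchctl',
--     '/usr/libexec/PlistBuddy', 'chflags', 'xattr',
--     'find', 'for app in', 'if [', 'fi', 'done',
--     'printf', 'defaults -currentHost'
-- ]
--
--
-- def _match_at(tail):
--     """Does some keep pattern start at the head of this tail?"""
--     return any(tail.startswith(p) for p in KEEP_PATTERNS)
--
--
-- def is_other_command(line):
--     """Check if line contains other commands we want to keep"""
--     stripped = line.strip()
--     if stripped and not stripped.startswith('#'):
--         # position-major single scan: test every position of `line` once
--         return any(_match_at(line[i:]) for i in range(len(line) + 1))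
--     return False
-- ===== Notes on version B (the rewrite author's own statement) =====
-- stated objective: alternative
-- what changed: Replaces A's pattern-major loop (one full substring search per keep pattern) by a single position-major left-to-right scan of the line that tests every position once for a prefix match against the pattern list.
import Mathlib
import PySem

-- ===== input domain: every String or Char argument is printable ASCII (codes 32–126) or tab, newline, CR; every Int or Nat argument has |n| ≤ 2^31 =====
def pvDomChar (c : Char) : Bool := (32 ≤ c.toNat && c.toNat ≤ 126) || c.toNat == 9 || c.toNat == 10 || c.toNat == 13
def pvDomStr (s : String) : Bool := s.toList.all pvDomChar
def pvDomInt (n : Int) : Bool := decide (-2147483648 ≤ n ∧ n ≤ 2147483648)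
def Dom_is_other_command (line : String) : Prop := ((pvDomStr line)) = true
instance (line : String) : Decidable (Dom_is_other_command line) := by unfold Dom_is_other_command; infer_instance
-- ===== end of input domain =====

-- B replaces A's pattern-major any(`p in line`) loop by a single position-major
-- scan of the line that tests each position for a pattern prefix (objective: alternative).

-- ===== PORT A =====
def keepPatternsA : List String :=
  ["sudo", "osascript", "killall", "launchctl",
   "/usr/libexec/PlistBuddy", "chflags", "xattr",
   "find", "for app in", "if [", "fi", "done",
   "printf", "defaults -currentHost"]

def is_other_command (line : String) : Bool :=
  let stripped := PySem.Str.strip line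
  if stripped == "" || PySem.Str.startswith stripped "#" then false
  else keepPatternsA.any (fun p => PySem.Str.isIn p line)

-- ===== PORT B =====
def KEEP_PATTERNS : List (List Char) :=
  ["sudo".toList, "osascript".toList, "killall".toList, "launchctl".toList,
   "/usr/libexec/PlistBuddy".toList, "chflags".toList, "xattr".toList,
   "find".toList, "for app in".toList, "if [".toList, "fi".toList, "done".toList,
   "printf".toList, "defaults -currentHost".toList]

-- _match_at(tail) = any(tail.startswith(p) for p in KEEP_PATTERNS)
def matchAt (tail : List Char) : Bool :=
  KEEP_PATTERNS.any (fun p => PySem.Chars.startswith tail p)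

-- 'any(_match_at(line[i:]) for i in range(len(line) + 1))'
def altScan : List Char → Bool
  | [] => matchAt []
  | c :: rest => matchAt (c :: rest) || altScan rest

def is_other_command_alt (line : String) : Bool :=
  let stripped := PySem.Str.strip line
  if stripped != "" && !PySem.Str.startswith stripped "#" then
    altScan line.toList
  else false

-- ===== PRECONDITION & SPEC =====
def Spec_is_other_command (line : String) (out : Bool) : Prop := out = is_other_command_alt line
instance (line : String) (out : Bool) : Decidable (Spec_is_other_command line out) := by unfold Spec_is_other_command; infer_instance

-- ===== CLAIM (what is proved, stated in full; the proofs are below) =====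
def Claim_equal_is_other_command : Prop := ∀ (line : String), Dom_is_other_command line → Spec_is_other_command line (is_other_command line)

-- ===== LEMMAS AND PROOFS =====

lemma altScan_iff (s : List Char) :
    altScan s = true ↔ ∃ p ∈ KEEP_PATTERNS, ∃ j, p <+: s.drop j := by
  induction s with
  | nil =>
      simp [altScan, matchAt, PySem.Chars.startswith, List.any_eq_true,
        List.isPrefixOf_iff_prefix]
  | cons c rest ih =>
      simp only [altScan, matchAt, Bool.or_eq_true, ih, List.any_eq_true,
        PySem.Chars.startswith, List.isPrefixOf_iff_prefix]
      constructor
      · rintro (⟨p, hp, hpre⟩ | ⟨p, hp, j, hpre⟩)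
        · exact ⟨p, hp, 0, by simpa using hpre⟩
        · exact ⟨p, hp, j + 1, by simpa using hpre⟩
      · rintro ⟨p, hp, j, hpre⟩
        cases j with
        | zero => exact Or.inl ⟨p, hp, by simpa using hpre⟩
        | succ j => exact Or.inr ⟨p, hp, j, by simpa using hpre⟩

lemma altScan_eq_any_isIn (s : List Char) :
    altScan s = KEEP_PATTERNS.any (fun p => PySem.Chars.isIn p s) := by
  rw [Bool.eq_iff_iff, altScan_iff, List.any_eq_true]
  exact exists_congr fun p => and_congr_right fun _ =>
    PySem.Chars.exists_prefix_drop_iff_isIn p s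

-- ===== VERDICT (by name: the statement is the Claim_ definition above) =====
theorem is_other_command_spec : Claim_equal_is_other_command := by
  intro line _
  unfold Spec_is_other_command is_other_command is_other_command_alt
  simp [altScan_eq_any_isIn, keepPatternsA, KEEP_PATTERNS, PySem.Str.isIn_eq]
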